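-- pv_equiv track=rewrite | github.com/AIlhomov/Aalto_CP_course | test/a.py | mis_greedy_adjlist
-- ===== SOURCE A (Python) =====
-- def mis_greedy_adjlist(G):
--     """
--     Maximal Independent Set (greedy).
--     G: dict {u: set(neighbors_of_u)} for an undirected simple graph.
--     Returns a set I that is independent and maximal.
--     Complexity: O(n + m) with adjacency lists.
--     """
--     I = set()
--     blocked = {u: False for u in G}   # True once u is chosen or adjacent to a chosen vertex
--     alive = set(G.keys())             # Optional: track remaining vertices
--
--     # Arbitrary order is fine; you can sort for determinism if you like
--     for u in list(G.keys()):
--         if u in alive and not blocked[u]: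
--             # choose u
--             I.add(u)
--             blocked[u] = True
--             # remove u and block its neighbors (mirrors "remove from V")
--             if u in alive:
--                 alive.remove(u)
--             for v in G[u]:
--                 blocked[v] = True
--                 alive.discard(v)
--     return I
-- ===== SOURCE B (Python) =====
-- def mis_greedy_adjlist(G):
--     """Greedy maximal independent set without A's blocked/alive state:
--     first build a reverse-adjacency index (who lists u as a neighbour),
--     then a vertex joins I exactly when none of its listers is already in I."""
--     pred = {u: [] for u in G}
--     for w in G:
--         for v in G[w]:
--             if v in pred:
--                 pred[v].append(w)
--     I = set()
--     for u in G:
--         if all(w not in I for w in pred[u]):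
--             I.add(u)
--     return I
-- ===== Notes on version B (the rewrite author's own statement) =====
-- stated objective: alternative
-- what changed: Replaces A's single push pass (blocked dict over all vertices plus an alive set, updated along each chosen vertex's neighbour list) by two staged passes: first build a reverse-adjacency index mapping each vertex to the vertices that list it, then admit a vertex exactly when none of its listers is already in the result set.
import Mathlib
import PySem

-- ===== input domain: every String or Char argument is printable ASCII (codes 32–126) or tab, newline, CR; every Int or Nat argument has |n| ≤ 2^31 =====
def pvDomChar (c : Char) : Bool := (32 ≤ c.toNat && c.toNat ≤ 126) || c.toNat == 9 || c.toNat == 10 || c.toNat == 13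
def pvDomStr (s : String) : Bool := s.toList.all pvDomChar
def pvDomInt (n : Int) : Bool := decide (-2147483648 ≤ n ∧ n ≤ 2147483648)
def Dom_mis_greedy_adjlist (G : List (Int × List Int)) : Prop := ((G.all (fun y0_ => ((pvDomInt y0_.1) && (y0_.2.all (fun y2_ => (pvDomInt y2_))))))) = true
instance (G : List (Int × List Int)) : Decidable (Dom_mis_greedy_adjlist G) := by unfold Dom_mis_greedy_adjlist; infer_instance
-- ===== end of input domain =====

-- B drops A's blocked dict and alive set: it first builds a reverse-adjacency
-- index and then admits a vertex exactly when none of the vertices listing it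
-- as a neighbour is already chosen (objective: alternative decomposition).

-- ===== PORT A =====
-- body of the inner 'for v in G[u]' loop (its updates are order-insensitive, so
-- iterating the Lean list in place of Python's hash-ordered set iteration is exact)
def pvStepInnerA (p : PySem.Dict Int Bool × PySem.Set Int) (v : Int) :
    PySem.Dict Int Bool × PySem.Set Int :=
  (p.1.insert v true, PySem.Set.discard p.2 v)

-- body of the main 'for u in list(G.keys())' loop; state = (I, blocked, alive)
def pvStepA (d : PySem.Dict Int (List Int))
    (s : PySem.Set Int × PySem.Dict Int Bool × PySem.Set Int) (u : Int) :
    PySem.Set Int × PySem.Dict Int Bool × PySem.Set Int :=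
  -- 'blocked[u]' and 'G[u]': u is always a present key here, so getD is exact
  if s.2.2.contains u && !(s.2.1.getD u false) then
    let I := PySem.Set.add s.1 u
    let blocked := s.2.1.insert u true
    let alive := if s.2.2.contains u then PySem.Set.discard s.2.2 u else s.2.2
    let bs := (d.getD u []).foldl pvStepInnerA (blocked, alive)
    (I, bs.1, bs.2)
  else s

def mis_greedy_adjlist (G : List (Int × List Int)) : List Int :=
  let d := PySem.Dict.ofList G
  let blocked0 := d.keys.foldl (fun (b : PySem.Dict Int Bool) u => b.insert u false) PySem.Dict.empty
  (d.keys.foldl (pvStepA d) (PySem.Set.empty, blocked0, PySem.Set.ofList d.keys)).1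

-- ===== PORT B =====
-- body of 'for v in G[w]: if v in pred: pred[v].append(w)'
def pvPredAdd (w : Int) (p : PySem.Dict Int (List Int)) (v : Int) :
    PySem.Dict Int (List Int) :=
  if p.contains v then p.modify v [] (· ++ [w]) else p

-- body of the second pass; 'all(w not in I for w in pred[u])' is
-- order-insensitive, and 'pred[u]' with u a key makes getD exact
def pvStepB (pred : PySem.Dict Int (List Int)) (I : PySem.Set Int) (u : Int) :
    PySem.Set Int :=
  if (pred.getD u []).all (fun w => !(I.contains w)) then PySem.Set.add I u else I

def mis_greedy_adjlist_alt (G : List (Int × List Int)) : List Int :=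
  let d := PySem.Dict.ofList G
  let pred0 := d.keys.foldl (fun (p : PySem.Dict Int (List Int)) u => p.insert u []) PySem.Dict.empty
  let pred := d.keys.foldl (fun p w => (d.getD w []).foldl (pvPredAdd w) p) pred0
  d.keys.foldl (pvStepB pred) PySem.Set.empty

-- ===== PRECONDITION & SPEC =====
def Spec_mis_greedy_adjlist (G : List (Int × List Int)) (out : List Int) : Prop := out = mis_greedy_adjlist_alt G
instance (G : List (Int × List Int)) (out : List Int) : Decidable (Spec_mis_greedy_adjlist G out) := by unfold Spec_mis_greedy_adjlist; infer_instance

-- ===== CLAIM (what is proved, stated in full; the proofs are below) =====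
def Claim_equal_mis_greedy_adjlist : Prop := ∀ (G : List (Int × List Int)), Dom_mis_greedy_adjlist G → Spec_mis_greedy_adjlist G (mis_greedy_adjlist G)

-- ===== LEMMAS AND PROOFS =====

-- '{u: c for u in ks}' over a constant-free base: every lookup with default c gives c
lemma getD_foldl_insert_const {ν : Type} [BEq ν] (c : ν) (ks : List Int)
    (b : PySem.Dict Int ν) (hb : ∀ x, b.getD x c = c) (x : Int) :
    (ks.foldl (fun (b : PySem.Dict Int ν) u => b.insert u c) b).getD x c = c := by
  induction ks generalizing b with
  | nil => exact hb x
  | cons u t ih =>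
      simp only [List.foldl_cons]
      refine ih _ (fun y => ?_)
      rw [PySem.Dict.getD_insert]
      split <;> simp [hb]

-- the inner neighbour loop of A: blocked gains exactly ns, alive loses exactly ns
lemma inner_loop (ns : List Int) (b : PySem.Dict Int Bool) (al : PySem.Set Int) :
    (∀ x, (ns.foldl pvStepInnerA (b, al)).1.getD x false = true ↔
      (b.getD x false = true ∨ x ∈ ns)) ∧
    (∀ x, x ∈ (ns.foldl pvStepInnerA (b, al)).2 ↔ (x ∈ al ∧ x ∉ ns)) := by
  induction ns generalizing b al with
  | nil => simp
  | cons v t ih =>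
      simp only [List.foldl_cons, pvStepInnerA]
      obtain ⟨ihb, ihal⟩ := ih (b.insert v true) (PySem.Set.discard al v)
      refine ⟨fun x => ?_, fun x => ?_⟩
      · rw [ihb x, PySem.Dict.getD_insert]
        split
        · simp_all
        · simp only [List.mem_cons]; tauto
      · rw [ihal x, PySem.Set.mem_discard]
        simp only [List.mem_cons]; tauto

-- one 'for v in G[w]' pass of B's index builder: keys untouched, x's list gains w
-- exactly when x ∈ vs and x is a key
lemma predAdd_inner (w : Int) (vs : List Int) (p : PySem.Dict Int (List Int)) :
    (∀ x, (vs.foldl (pvPredAdd w) p).contains x = p.contains x) ∧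
    (∀ x y, y ∈ (vs.foldl (pvPredAdd w) p).getD x [] ↔
      (y ∈ p.getD x [] ∨ (y = w ∧ x ∈ vs ∧ p.contains x = true))) := by
  induction vs generalizing p with
  | nil => simp
  | cons v t ih =>
      simp only [List.foldl_cons, pvPredAdd]
      by_cases hv : p.contains v = true
      · rw [if_pos hv]
        obtain ⟨ihc, ihm⟩ := ih (p.modify v [] (· ++ [w]))
        refine ⟨fun x => ?_, fun x y => ?_⟩
        · rw [ihc x, PySem.Dict.contains_modify]
          by_cases hxv : x = v <;> simp [hxv, hv]
        · rw [ihm x y, PySem.Dict.contains_modify, PySem.Dict.getD_modify]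
          by_cases hxv : x = v
          · subst hxv; simp [hv, List.mem_cons]; tauto
          · simp only [if_neg hxv, List.mem_cons]
            have : (x == v) = false := by simp [hxv]
            rw [this]; simp only [Bool.false_or]; tauto
      · rw [if_neg hv]
        obtain ⟨ihc, ihm⟩ := ih p
        refine ⟨ihc, fun x y => ?_⟩
        rw [ihm x y]
        simp only [List.mem_cons]
        constructor
        · rintro (h | ⟨rfl, hx, hc⟩)
          · exact Or.inl h
          · exact Or.inr ⟨rfl, Or.inr hx, hc⟩
        · rintro (h | ⟨rfl, rfl | hx, hc⟩)
          · exact Or.inl h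
          · exact absurd hc hv
          · exact Or.inr ⟨rfl, hx, hc⟩

-- the whole index-building pass: x's list holds exactly the keys y with x ∈ G[y]
lemma predAdd_outer (d : PySem.Dict Int (List Int)) (ws : List Int)
    (p : PySem.Dict Int (List Int)) :
    (∀ x, ((ws.foldl (fun p w => (d.getD w []).foldl (pvPredAdd w) p) p).contains x)
        = p.contains x) ∧
    (∀ x y, y ∈ (ws.foldl (fun p w => (d.getD w []).foldl (pvPredAdd w) p) p).getD x [] ↔
      (y ∈ p.getD x [] ∨ (y ∈ ws ∧ x ∈ d.getD y [] ∧ p.contains x = true))) := by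
  induction ws generalizing p with
  | nil => simp
  | cons w t ih =>
      simp only [List.foldl_cons]
      obtain ⟨hc1, hm1⟩ := predAdd_inner w (d.getD w []) p
      obtain ⟨ihc, ihm⟩ := ih ((d.getD w []).foldl (pvPredAdd w) p)
      refine ⟨fun x => by rw [ihc x, hc1 x], fun x y => ?_⟩
      rw [ihm x y, hm1 x y, hc1 x]
      simp only [List.mem_cons]
      constructor
      · rintro ((h | ⟨rfl, hx, hc⟩) | ⟨hy, hx, hc⟩)
        · exact Or.inl h
        · exact Or.inr ⟨Or.inl rfl, hx, hc⟩
        · exact Or.inr ⟨Or.inr hy, hx, hc⟩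
      · rintro (h | ⟨rfl | hy, hx, hc⟩)
        · exact Or.inl (Or.inl h)
        · exact Or.inl (Or.inr ⟨rfl, hx, hc⟩)
        · exact Or.inr ⟨hy, hx, hc⟩

-- the 'blocked' predicate B makes implicit: chosen, or neighbour of a chosen vertex
def pvBlk (d : PySem.Dict Int (List Int)) (I : PySem.Set Int) (x : Int) : Prop :=
  x ∈ I ∨ ∃ w ∈ I, x ∈ d.getD w []

-- main loop invariant: A's (I, blocked, alive) collapses to B's bare I
lemma main_loop (d pred : PySem.Dict Int (List Int))
    (hpred : ∀ x y, y ∈ pred.getD x [] ↔ (y ∈ d.keys ∧ x ∈ d.getD y [] ∧ x ∈ d.keys))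
    (R : List Int) (hR : R.Nodup) (hRK : ∀ u ∈ R, u ∈ d.keys)
    (I : PySem.Set Int) (b : PySem.Dict Int Bool) (al : PySem.Set Int)
    (hRI : ∀ u ∈ R, u ∉ I) (hIK : ∀ x ∈ I, x ∈ d.keys)
    (hb : ∀ x, b.getD x false = true ↔ pvBlk d I x)
    (hal : ∀ x, x ∈ al ↔ x ∈ d.keys ∧ ¬ pvBlk d I x) :
    (R.foldl (pvStepA d) (I, b, al)).1 = R.foldl (pvStepB pred) I := by
  induction R generalizing I b al with
  | nil => rfl
  | cons u t ih =>
      simp only [List.foldl_cons]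
      obtain ⟨hu_t, hRnd⟩ := List.nodup_cons.mp hR
      have huK : u ∈ d.keys := hRK u List.mem_cons_self
      have huI : u ∉ I := hRI u List.mem_cons_self
      -- the two branch conditions coincide
      have hBcond : ((pred.getD u []).all (fun w => !(I.contains w)) = true) ↔
          ¬ pvBlk d I u := by
        unfold pvBlk
        simp only [List.all_eq_true, Bool.not_eq_eq_eq_not, Bool.not_true,
          PySem.Set.contains_eq_listContains, List.contains_eq_mem, decide_eq_false_iff_not]
        constructor
        · rintro h (h1 | ⟨w, hw, hm⟩)
          · exact huI h1
          · exact h w ((hpred u w).mpr ⟨hIK w hw, hm, huK⟩) hw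
        · intro h w hw hwI
          obtain ⟨-, hm, -⟩ := (hpred u w).mp hw
          exact h (Or.inr ⟨w, hwI, hm⟩)
      have hAcond : (al.contains u && !(b.getD u false)) = true ↔ ¬ pvBlk d I u := by
        rw [Bool.and_eq_true, PySem.Set.contains_iff, hal u, Bool.not_eq_eq_eq_not,
          Bool.not_true]
        constructor
        · rintro ⟨⟨-, h⟩, -⟩; exact h
        · intro h
          refine ⟨⟨huK, h⟩, ?_⟩
          cases hbv : b.getD u false with
          | false => rfl
          | true => exact absurd ((hb u).mp hbv) h
      by_cases hc : pvBlk d I u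
      · -- both skip u
        have hA : pvStepA d (I, b, al) u = (I, b, al) := by
          unfold pvStepA
          rw [if_neg]
          intro h; exact absurd hc (hAcond.mp h)
        have hB : pvStepB pred I u = I := by
          unfold pvStepB
          rw [if_neg]
          intro h; exact absurd hc (hBcond.mp h)
        rw [hA, hB]
        exact ih hRnd (fun v hv => hRK v (List.mem_cons_of_mem _ hv)) I b al
          (fun v hv => hRI v (List.mem_cons_of_mem _ hv)) hIK hb hal
      · -- both choose u
        have hmemal : u ∈ al := (hal u).mpr ⟨huK, hc⟩
        set ns := d.getD u [] with hns
        have hA : pvStepA d (I, b, al) u =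
            (PySem.Set.add I u,
             (ns.foldl pvStepInnerA (b.insert u true, PySem.Set.discard al u)).1,
             (ns.foldl pvStepInnerA (b.insert u true, PySem.Set.discard al u)).2) := by
          unfold pvStepA
          rw [if_pos (hAcond.mpr hc)]
          simp [hns, hmemal]
        have hB : pvStepB pred I u = PySem.Set.add I u := by
          unfold pvStepB; rw [if_pos (hBcond.mpr hc)]
        rw [hA, hB]
        obtain ⟨hib, hial⟩ := inner_loop ns (b.insert u true) (PySem.Set.discard al u)
        have hblk' : ∀ x, pvBlk d (PySem.Set.add I u) x ↔ (x = u ∨ pvBlk d I x ∨ x ∈ ns) := by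
          intro x
          unfold pvBlk
          simp only [PySem.Set.mem_add]
          constructor
          · rintro ((h | h) | ⟨w, hw | rfl, hm⟩)
            · exact Or.inr (Or.inl (Or.inl h))
            · exact Or.inl h
            · exact Or.inr (Or.inl (Or.inr ⟨w, hw, hm⟩))
            · exact Or.inr (Or.inr hm)
          · rintro (rfl | (h | ⟨w, hw, hm⟩) | h)
            · exact Or.inl (Or.inr rfl)
            · exact Or.inl (Or.inl h)
            · exact Or.inr ⟨w, Or.inl hw, hm⟩
            · exact Or.inr ⟨u, Or.inr rfl, h⟩
        refine ih hRnd (fun v hv => hRK v (List.mem_cons_of_mem _ hv)) _ _ _ ?_ ?_ ?_ ?_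
        · intro v hv
          rw [PySem.Set.mem_add]
          rintro (h | h)
          · exact hRI v (List.mem_cons_of_mem _ hv) h
          · exact hu_t (h ▸ hv)
        · intro x hx
          rcases (PySem.Set.mem_add I u x).mp hx with h | rfl
          · exact hIK x h
          · exact huK
        · intro x
          rw [hib x, hblk' x, PySem.Dict.getD_insert]
          split
          · simp_all
          · rw [hb x]; tauto
        · intro x
          rw [hial x, PySem.Set.mem_discard, hal x, hblk' x]
          tauto

-- ===== VERDICT (by name: the statement is the Claim_ definition above) =====
theorem mis_greedy_adjlist_spec : Claim_equal_mis_greedy_adjlist := by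
  intro G _
  unfold Spec_mis_greedy_adjlist mis_greedy_adjlist mis_greedy_adjlist_alt
  dsimp only
  set d := PySem.Dict.ofList G with hd
  set pred0 := d.keys.foldl (fun (p : PySem.Dict Int (List Int)) u => p.insert u []) PySem.Dict.empty with hpred0
  have hc0 : ∀ x, pred0.contains x = decide (x ∈ d.keys) := by
    intro x
    have hk : (d.keys.foldl (fun (p : PySem.Dict Int (List Int)) u => p.insert u []) PySem.Dict.empty).keys
        = PySem.Set.update PySem.Dict.empty.keys d.keys :=
      PySem.Dict.keys_foldl_insert d.keys (fun _ _ => []) PySem.Dict.empty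
    rw [hpred0, PySem.Dict.contains_eq_decide_mem_keys, hk]
    apply decide_eq_decide.mpr
    simp [PySem.Set.mem_update, PySem.Dict.keys_empty]
  have hg0 : ∀ x, pred0.getD x [] = [] := by
    intro x
    exact getD_foldl_insert_const [] d.keys PySem.Dict.empty
      (fun y => PySem.Dict.getD_empty y []) x
  have hpred : ∀ x y,
      y ∈ (d.keys.foldl (fun p w => (d.getD w []).foldl (pvPredAdd w) p) pred0).getD x [] ↔
      (y ∈ d.keys ∧ x ∈ d.getD y [] ∧ x ∈ d.keys) := by
    intro x y
    rw [(predAdd_outer d d.keys pred0).2 x y, hg0 x, hc0 x]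
    simp only [List.not_mem_nil, false_or, decide_eq_true_eq]
  refine main_loop d _ hpred d.keys (PySem.Dict.nodup_keys_ofList G) (fun u hu => hu)
    PySem.Set.empty _ _ (fun u _ h => absurd h (List.not_mem_nil))
    (fun x h => absurd h (List.not_mem_nil)) ?_ ?_
  · intro x
    unfold pvBlk
    constructor
    · intro h
      rw [getD_foldl_insert_const false d.keys PySem.Dict.empty
        (fun y => PySem.Dict.getD_empty y false)] at h
      exact absurd h (by simp)
    · rintro (h | ⟨w, hw, -⟩) <;> exact absurd (by assumption) (List.not_mem_nil)
  · intro x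
    unfold pvBlk
    rw [PySem.Set.mem_ofList]
    constructor
    · intro h
      exact ⟨h, by rintro (h1 | ⟨w, hw, -⟩) <;> exact absurd (by assumption) (List.not_mem_nil)⟩
    · exact fun h => h.1
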